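-- pv_equiv track=rewrite | github.com/tundewey/sentinel | backend/common/audit_pdf.py | _order_actions_for_audit
-- ===== SOURCE A (Python) =====
-- from typing import Any
--
-- def _order_actions_for_audit(actions: list[dict[str, Any]]) -> list[tuple[dict[str, Any], int]]:
--     if not actions:
--         return []
--     by_parent: dict[str | None, list[dict[str, Any]]] = {}
--     for a in actions:
--         pid = a.get("parent_action_id") or None
--         if pid not in by_parent:
--             by_parent[pid] = []
--         by_parent[pid].append(a)
--     for lst in by_parent.values():
--         lst.sort(key=lambda x: (x.get("created_at") or ""))
--     out: list[tuple[dict[str, Any], int]] = []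
--     seen: set[str] = set()
--
--     def visit(node: dict[str, Any], depth: int) -> None:
--         out.append((node, depth))
--         seen.add(node.get("id", ""))
--         for ch in by_parent.get(node.get("id"), []):
--             visit(ch, depth + 1)
--
--     roots = [a for a in actions if not a.get("parent_action_id")]
--     roots.sort(key=lambda x: (x.get("created_at") or ""))
--     for r in roots:
--         visit(r, 0)
--     for a in actions:
--         if a.get("id") not in seen and a.get("id"):
--             out.append((a, 0))
--     return out
-- ===== SOURCE B (Python) =====
-- from typing import Any
--
--
-- def _order_actions_for_audit(actions: list[dict[str, Any]]) -> list[tuple[dict[str, Any], int]]: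
--     if not actions:
--         return []
--     by_parent: dict[str | None, list[dict[str, Any]]] = {}
--     for a in actions:
--         by_parent.setdefault(a.get("parent_action_id") or None, []).append(a)
--     by_parent = {k: sorted(v, key=lambda x: (x.get("created_at") or "")) for k, v in by_parent.items()}
--     roots = sorted((a for a in actions if not a.get("parent_action_id")),
--                    key=lambda x: (x.get("created_at") or ""))
--     out: list[tuple[dict[str, Any], int]] = []
--     seen: set[str] = set()
--     stack: list[tuple[dict[str, Any], int]] = [(r, 0) for r in reversed(roots)]
--     max_depth = len(actions)
--     while stack:
--         node, depth = stack.pop()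
--         if depth > max_depth:
--             # a pre-order path can visit at most len(actions) distinct nodes, so this
--             # means the parent links form a cycle (where A's recursion would overflow)
--             raise RecursionError("action tree contains a cycle")
--         out.append((node, depth))
--         seen.add(node.get("id", ""))
--         for ch in reversed(by_parent.get(node.get("id"), [])):
--             stack.append((ch, depth + 1))
--     for a in actions:
--         if a.get("id") not in seen and a.get("id"):
--             out.append((a, 0))
--     return out
-- ===== Notes on version B (the rewrite author's own statement) =====
-- stated objective: alternative
-- what changed: The recursive visit() is replaced by an iterative pre-order DFS over an explicit stack of (node, depth) pairs (children pushed in reverse, with a depth bound of len(actions) as cycle detection), and the adjacency map is built with setdefault and rebuilt as a sorted dict comprehension; the orphan pass is unchanged.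
import Mathlib
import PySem

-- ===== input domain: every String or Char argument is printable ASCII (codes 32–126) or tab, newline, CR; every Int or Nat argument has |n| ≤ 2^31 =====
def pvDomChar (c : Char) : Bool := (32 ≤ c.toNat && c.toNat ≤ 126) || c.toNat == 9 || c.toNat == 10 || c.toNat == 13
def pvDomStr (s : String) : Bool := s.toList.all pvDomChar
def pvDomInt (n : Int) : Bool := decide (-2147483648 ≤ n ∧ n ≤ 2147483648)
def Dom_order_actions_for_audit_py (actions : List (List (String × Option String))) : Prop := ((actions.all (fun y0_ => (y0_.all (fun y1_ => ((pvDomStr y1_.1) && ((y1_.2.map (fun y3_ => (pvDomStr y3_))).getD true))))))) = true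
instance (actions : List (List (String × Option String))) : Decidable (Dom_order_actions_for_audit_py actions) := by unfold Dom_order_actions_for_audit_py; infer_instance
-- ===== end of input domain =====

-- B replaces A's recursive `visit` with an explicit stack of (node, depth) pairs (iterative
-- pre-order DFS, with a depth bound as cycle detection) and builds the adjacency map with
-- setdefault / a rebuilt sorted dict; same return value (objective: alternative
-- decomposition, no speed claim).

-- ===== PORT A =====
-- an action is a python dict modelled as an association list; duplicate keys behave like
-- dict(pairs): the LAST value wins, which is what PySem.Dict.ofList gives.
def pvGet (a : List (String × Option String)) (k : String) : Option (Option String) :=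
  (PySem.Dict.ofList a).get? k

-- a.get("parent_action_id") or None  (missing, None and "" all become None)
def pvPid (a : List (String × Option String)) : Option String :=
  match pvGet a "parent_action_id" with
  | some (some s) => if s = "" then none else some s
  | _ => none

-- a.get("id")
def pvIdKey (a : List (String × Option String)) : Option String :=
  (pvGet a "id").join

-- a.get("id", "")
def pvSeenKey (a : List (String × Option String)) : Option String :=
  (pvGet a "id").getD (some "")

-- x.get("created_at") or ""
def pvCKey (a : List (String × Option String)) : String :=
  match pvGet a "created_at" with
  | some (some s) => s
  | _ => ""

-- truthiness of a.get("id") (an Optional[str])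
def pvTruthyId (v : Option String) : Bool :=
  match v with
  | some s => s != ""
  | none => false

-- A's grouping loop: if pid not in by_parent: by_parent[pid] = []; by_parent[pid].append(a)
def pvBuildByParent (actions : List (List (String × Option String))) :
    PySem.Dict (Option String) (List (List (String × Option String))) :=
  actions.foldl
    (fun bp a =>
      let pid := pvPid a
      let bp := if bp.contains pid then bp else bp.insert pid []
      bp.modify pid [] (· ++ [a]))
    PySem.Dict.empty

-- for lst in by_parent.values(): lst.sort(key=...)  (in-place sort of every value)
def pvSortValues (bp : PySem.Dict (Option String) (List (List (String × Option String)))) :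
    PySem.Dict (Option String) (List (List (String × Option String))) :=
  PySem.Dict.mk (bp.items.map (fun p => (p.1, PySem.List.sorted p.2 pvCKey false)))

-- state threaded through the traversal: (out, seen)
-- A's recursive visit, with a structural fuel guard for totality (the Python recursion
-- diverges exactly outside Pre_; inside Pre_ every pre-order path is shorter than |actions|,
-- so the seeded fuel never runs out and the guard branch is unreachable).
mutual
def pvVisitA (bp : PySem.Dict (Option String) (List (List (String × Option String))))
    (f : Nat) (node : List (String × Option String)) (depth : Int)
    (s : List ((List (String × Option String)) × Int) × PySem.Set (Option String)) :
    List ((List (String × Option String)) × Int) × PySem.Set (Option String) :=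
  match f with
  | 0 => s
  | f + 1 =>
      pvVisitList bp f ((bp.get? (pvIdKey node)).getD []) (depth + 1)
        (s.1 ++ [(node, depth)], PySem.Set.add s.2 (pvSeenKey node))
termination_by (f, 0)

-- for ch in children: visit(ch, depth+1)   (also used for the roots loop)
def pvVisitList (bp : PySem.Dict (Option String) (List (List (String × Option String))))
    (f : Nat) (l : List (List (String × Option String))) (depth : Int)
    (s : List ((List (String × Option String)) × Int) × PySem.Set (Option String)) :
    List ((List (String × Option String)) × Int) × PySem.Set (Option String) :=
  match l with
  | [] => s
  | ch :: tl => pvVisitList bp f tl depth (pvVisitA bp f ch depth s)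
termination_by (f, l.length + 1)
end

def order_actions_for_audit_py (actions : List (List (String × Option String))) :
    List ((List (String × Option String)) × Int) :=
  if actions = [] then []
  else
    let bp := pvSortValues (pvBuildByParent actions)
    let roots := PySem.List.sorted (actions.filter (fun a => pvPid a = none)) pvCKey false
    let s := pvVisitList bp (actions.length + 1) roots 0 ([], PySem.Set.empty)
    actions.foldl
      (fun out a =>
        if (!(PySem.Set.contains s.2 (pvIdKey a))) && pvTruthyId (pvIdKey a)
        then out ++ [(a, 0)] else out)
      s.1

-- ===== PORT B =====
-- B's grouping loop: by_parent.setdefault(pid, []).append(a)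
def pvBuildByParentB (actions : List (List (String × Option String))) :
    PySem.Dict (Option String) (List (List (String × Option String))) :=
  actions.foldl
    (fun bp a =>
      let pid := pvPid a
      (bp.setdefault pid []).modify pid [] (· ++ [a]))
    PySem.Dict.empty

-- bound used by pvLoopB's termination measure: any children list from bp is at most this long
theorem pv_child_len_le (bp : PySem.Dict (Option String) (List (List (String × Option String)))) (k : Option String) :
    ((bp.get? k).getD []).length ≤ (bp.values.map List.length).sum := by
  cases h : bp.get? k with
  | none => simp
  | some v =>
    have hi := PySem.Dict.mem_items_of_get?_eq_some bp h
    have hv : v ∈ bp.values := by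
      simp only [PySem.Dict.values]
      exact List.mem_map_of_mem hi
    have : v.length ∈ bp.values.map List.length := List.mem_map_of_mem hv
    simpa using List.le_sum_of_mem (by simpa using this)

-- B's while loop over the explicit stack.  Python's stack is a list popped at the END and
-- seeded/extended with REVERSED lists; here the head of the list is the top of the stack, so
-- the seed and the children pushes appear in order — the same pop sequence, exactly.
-- Source B stores (node, depth) and raises on depth > len(actions) (cycle detection); here the
-- entry instead carries the equivalent remaining fuel len(actions)+1-depth, and the fuel-0
-- branch is that raise (unreachable inside Pre_, where every pre-order path is short).
def pvLoopB (bp : PySem.Dict (Option String) (List (List (String × Option String))))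
    (st : List ((List (String × Option String)) × Int × Nat))
    (s : List ((List (String × Option String)) × Int) × PySem.Set (Option String)) :
    List ((List (String × Option String)) × Int) × PySem.Set (Option String) :=
  match st with
  | [] => s
  | (_, _, 0) :: rest => pvLoopB bp rest s
  | (node, depth, f + 1) :: rest =>
      pvLoopB bp
        ((((bp.get? (pvIdKey node)).getD []).map (fun ch => (ch, depth + 1, f))) ++ rest)
        (s.1 ++ [(node, depth)], PySem.Set.add s.2 (pvSeenKey node))
termination_by (st.map (fun e => ((bp.values.map List.length).sum + 1) ^ e.2.2)).sum
decreasing_by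
  · simp only [List.map_cons, List.sum_cons, pow_zero]
    omega
  · have hc := pv_child_len_le bp (pvIdKey node)
    simp only [List.map_cons, List.sum_cons, List.map_append, List.map_map, List.sum_append,
      Function.comp_def]
    have hp : 0 < ((bp.values.map List.length).sum + 1) ^ f := pow_pos (by omega) f
    have hmul : ((bp.get? (pvIdKey node)).getD []).length *
        ((bp.values.map List.length).sum + 1) ^ f <
        ((bp.values.map List.length).sum + 1) * ((bp.values.map List.length).sum + 1) ^ f :=
      Nat.mul_lt_mul_of_lt_of_le (by omega) (Nat.le_refl _) hp
    have hsum : (List.map (fun _ => ((bp.values.map List.length).sum + 1) ^ f)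
        ((bp.get? (pvIdKey node)).getD [])).sum =
        ((bp.get? (pvIdKey node)).getD []).length *
          ((bp.values.map List.length).sum + 1) ^ f := by
      simp [List.map_const', List.sum_replicate, smul_eq_mul]
    rw [pow_succ']
    omega

def order_actions_for_audit_py_alt (actions : List (List (String × Option String))) :
    List ((List (String × Option String)) × Int) :=
  if actions = [] then []
  else
    let bp := pvSortValues (pvBuildByParentB actions)
    let roots := PySem.List.sorted (actions.filter (fun a => pvPid a = none)) pvCKey false
    let s := pvLoopB bp (roots.map (fun r => (r, 0, actions.length + 1))) ([], PySem.Set.empty)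
    actions.foldl
      (fun out a =>
        if (!(PySem.Set.contains s.2 (pvIdKey a))) && pvTruthyId (pvIdKey a)
        then out ++ [(a, 0)] else out)
      s.1

-- ===== PRECONDITION & SPEC =====
-- Pre_ is a property of the INPUT's parent-link graph (acyclicity of the part reachable from
-- the roots), stated via the standard n-step transitive closure of the child relation below —
-- it mentions nothing of the algorithm (no out/seen/depth/sorting), only which action points
-- at which.
-- the parent-link graph of the input: b is a child of a when b's (truthy) parent_action_id
-- equals a's id (both missing/None/"" normalised exactly as the Python normalises them)
def pvSuccG (actions : List (List (String × Option String)))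
    (a : List (String × Option String)) : List (List (String × Option String)) :=
  actions.filter (fun b => pvPid b = pvIdKey a)

-- one expansion step of a reachable set: add every child of a member (dedup by membership)
def pvGrow (actions : List (List (String × Option String)))
    (S : List (List (String × Option String))) : List (List (String × Option String)) :=
  (S.flatMap (pvSuccG actions)).foldl (fun T b => if b ∈ T then T else T ++ [b]) S

-- n-step reachable set (n = |actions| saturates: a shortest path repeats no node)
def pvReach (actions : List (List (String × Option String)))
    (S : List (List (String × Option String))) : Nat → List (List (String × Option String))
  | 0 => S
  | n + 1 => pvReach actions (pvGrow actions S) n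

-- Pre_ excludes exactly the inputs on which Python A's recursion diverges (RecursionError):
-- those where some action reachable from a root along parent links lies on a parent-link
-- cycle (e.g. [{}]: a root with no id re-enters the root list).  On every input with no such
-- reachable cycle A returns normally, and all of those are admitted.
def Pre_order_actions_for_audit_py (actions : List (List (String × Option String))) : Prop :=
  ∀ a ∈ pvReach actions (actions.filter (fun x => pvPid x = none)) actions.length,
    a ∉ pvReach actions (pvSuccG actions a) actions.length

instance (actions : List (List (String × Option String))) : Decidable (Pre_order_actions_for_audit_py actions) := by
  unfold Pre_order_actions_for_audit_py; infer_instance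

def pvWitness_order_actions_for_audit_py : (List (List (String × Option String))) :=
  [[("id", some "a"), ("created_at", some "2024-01-01")],
   [("id", some "b"), ("parent_action_id", some "a"), ("created_at", some "2024-01-02")]]

def Spec_order_actions_for_audit_py (actions : List (List (String × Option String))) (out : List ((List (String × Option String)) × Int)) : Prop := out = order_actions_for_audit_py_alt actions
instance (actions : List (List (String × Option String))) (out : List ((List (String × Option String)) × Int)) : Decidable (Spec_order_actions_for_audit_py actions out) := by unfold Spec_order_actions_for_audit_py; infer_instance

-- ===== CLAIM (what is proved, stated in full; the proofs are below) =====
def Claim_equal_order_actions_for_audit_py : Prop := ∀ (actions : List (List (String × Option String))), Dom_order_actions_for_audit_py actions → Pre_order_actions_for_audit_py actions → Spec_order_actions_for_audit_py actions (order_actions_for_audit_py actions)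

-- ===== LEMMAS AND PROOFS =====

theorem pv_loopB_nil (bp : PySem.Dict (Option String) (List (List (String × Option String))))
    (s : List ((List (String × Option String)) × Int) × PySem.Set (Option String)) :
    pvLoopB bp [] s = s := by
  rw [pvLoopB]

theorem pv_builders_eq (actions : List (List (String × Option String))) :
    pvBuildByParentB actions = pvBuildByParent actions := by
  unfold pvBuildByParentB pvBuildByParent
  congr 1
  funext bp a
  by_cases h : bp.contains (pvPid a)
  all_goals simp [PySem.Dict.setdefault_of_contains, PySem.Dict.setdefault_of_not_contains, h]

theorem pv_loop_visit (bp : PySem.Dict (Option String) (List (List (String × Option String))))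
    (f : Nat) :
    ∀ (l : List (List (String × Option String))) (depth : Int)
      (st : List ((List (String × Option String)) × Int × Nat))
      (s : List ((List (String × Option String)) × Int) × PySem.Set (Option String)),
      pvLoopB bp (l.map (fun n => (n, depth, f)) ++ st) s =
        pvLoopB bp st (pvVisitList bp f l depth s) := by
  induction f with
  | zero =>
    intro l
    induction l with
    | nil => intro depth st s; simp [pvVisitList]
    | cons n tl ih =>
      intro depth st s
      rw [List.map_cons, List.cons_append, pvLoopB, ih, pvVisitList, pvVisitA]
  | succ f ihf =>
    intro l
    induction l with
    | nil => intro depth st s; simp [pvVisitList]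
    | cons n tl ih =>
      intro depth st s
      rw [List.map_cons, List.cons_append, pvLoopB,
        ihf ((bp.get? (pvIdKey n)).getD []) (depth + 1) (tl.map (fun n => (n, depth, f + 1)) ++ st),
        ← pvVisitA, ih, ← pvVisitList]

-- ===== VERDICT (by name: the statement is the Claim_ definition above) =====
theorem order_actions_for_audit_py_spec : Claim_equal_order_actions_for_audit_py := by
  intro actions _ _
  unfold Spec_order_actions_for_audit_py
  unfold order_actions_for_audit_py order_actions_for_audit_py_alt
  rw [pv_builders_eq]
  by_cases h : actions = []
  · simp [h]
  · simp only [h]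
    have := pv_loop_visit (pvSortValues (pvBuildByParent actions)) (actions.length + 1)
      (PySem.List.sorted (actions.filter (fun a => pvPid a = none)) pvCKey false) 0 []
      ([], PySem.Set.empty)
    simp only [List.append_nil] at this
    rw [this, pv_loopB_nil]
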